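-- pv_equiv track=rewrite | github.com/Ryan-wong123/python-algorithm | lab 5/mst-kruskal-clustering.py | get_clusters_from_mst
-- ===== SOURCE A (Python) =====
-- from collections import defaultdict
--
-- class UnionFind:
--     def __init__(self, nodes):
--         # Initializes each node as its own parent
--         self.parent = {node: node for node in nodes}
--
--     def find(self, x):
--         #Finds the root of a node with path compression
--         while self.parent[x] != x:
--             self.parent[x] = self.parent[self.parent[x]] # Path compression
--             x = self.parent[x]
--         return x
--
--     def union(self, x, y):
--         # Merges two sets if they are disjoint
--         px, py = self.find(x), self.find(y)
--         if px == py: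
--             return False
--         self.parent[px] = py
--         return True
--
-- def get_clusters_from_mst(mst, k, nodes):
--     for _ in range(k - 1):
--         if mst:
--             mst.pop() # remove last-added edge
--
--     # Rebuild clusters from remaining MST edges
--     uf = UnionFind(nodes)
--     for weight, u, v in mst:
--         uf.union(u, v)
--
--     # Group nodes by their root parent
--     clusters = defaultdict(list)
--     for node in nodes:
--         clusters[uf.find(node)].append(node)
--
--     # Sorts clusters by:
--     # 1. Size (descending)
--     # 2. Lexicographically smallest node
--     sorted_clusters = sorted(clusters.values(), key=lambda c: (-len(c), sorted(c)))
--     return [sorted(cluster) for cluster in sorted_clusters]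
-- ===== SOURCE B (Python) =====
-- def get_clusters_from_mst(mst, k, nodes):
--     # Drop the last k-1 edges in one slice deletion (same observable mutation of mst).
--     del mst[max(len(mst) - (k - 1), 0):]
--
--     # Naive relabelling instead of union-find: each node carries the
--     # representative of its component; an edge rewrites one label to the other.
--     label = {node: node for node in nodes}
--     for weight, u, v in mst:
--         lu, lv = label[u], label[v]
--         if lu != lv:
--             for node in label:
--                 if label[node] == lu:
--                     label[node] = lv
--
--     clusters = {}
--     for node in nodes:
--         clusters.setdefault(label[node], []).append(node)
--
--     ordered = sorted(clusters.values(), key=lambda c: (-len(c), sorted(c)))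
--     return [sorted(c) for c in ordered]
-- ===== Notes on version B (the rewrite author's own statement) =====
-- stated objective: alternative
-- what changed: The path-compressing union-find is replaced by naive component relabelling (a label dict where processing an edge rewrites every occurrence of one endpoint's label to the other's), and the k-1 guarded pops become a single slice deletion; grouping and sorting are unchanged.
import Mathlib
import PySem

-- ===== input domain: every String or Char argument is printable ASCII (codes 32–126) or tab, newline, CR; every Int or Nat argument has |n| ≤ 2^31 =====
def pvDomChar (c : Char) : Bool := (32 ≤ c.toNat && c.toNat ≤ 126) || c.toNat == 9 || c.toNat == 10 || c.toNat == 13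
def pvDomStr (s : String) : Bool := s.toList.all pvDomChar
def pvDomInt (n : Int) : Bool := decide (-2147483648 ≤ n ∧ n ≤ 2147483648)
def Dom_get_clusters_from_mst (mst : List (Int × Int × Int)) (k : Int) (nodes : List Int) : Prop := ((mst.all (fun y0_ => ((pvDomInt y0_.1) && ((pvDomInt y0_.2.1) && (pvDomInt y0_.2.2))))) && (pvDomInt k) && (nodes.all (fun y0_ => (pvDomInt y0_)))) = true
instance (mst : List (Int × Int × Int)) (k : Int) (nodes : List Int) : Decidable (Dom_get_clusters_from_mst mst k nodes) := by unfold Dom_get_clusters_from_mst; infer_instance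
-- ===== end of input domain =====

-- A cuts an MST into clusters with a path-compressing union-find; B replaces the union-find by
-- naive label rewriting (each node carries its component representative) and performs the k-1
-- pops as one slice deletion — objective: alternative. Both Pythons mutate `mst` identically
-- (truncation by the same pops); the theorems are about the return value.


-- ===== PORT A =====
-- UnionFind.find: `while parent[x] != x: parent[x] = parent[parent[x]]; x = parent[x]`.
-- The while loop is ported with fuel; fuel `nodes.length + 1` bounds the parent chain (the
-- parents form a forest over the distinct nodes, so Python's loop terminates within that many
-- steps — proved in pvFind_spec below). A missing key — Python's KeyError — returns the state
-- unchanged here and is excluded by Pre_.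
def pvFind (fuel : Nat) (p : PySem.Dict Int Int) (x : Int) : PySem.Dict Int Int × Int :=
  match fuel with
  | 0 => (p, x)
  | fuel + 1 =>
    match p.get? x with
    | none => (p, x)                                   -- KeyError (outside Pre_)
    | some px =>
      if px = x then (p, x)
      else
        match p.get? px with
        | none => (p, x)                               -- KeyError (outside Pre_)
        | some ppx => pvFind fuel (p.insert x ppx) ppx -- parent[x] = parent[parent[x]]; x = parent[x]

-- UnionFind.union
def pvUnion (fuel : Nat) (p : PySem.Dict Int Int) (x y : Int) : PySem.Dict Int Int × Bool :=
  let r1 := pvFind fuel p x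
  let r2 := pvFind fuel r1.1 y
  if r1.2 = r2.2 then (r2.1, false) else (r2.1.insert r1.2 r2.2, true)

-- for _ in range(k - 1): if mst: mst.pop()
def pvPops (k : Int) (mst : List (Int × Int × Int)) : List (Int × Int × Int) :=
  (PySem.List.pyRange 0 (k - 1) 1).foldl (fun m _ => if m = [] then m else m.dropLast) mst

-- UnionFind.__init__: parent = {node: node for node in nodes}
def pvInitUF (nodes : List Int) : PySem.Dict Int Int :=
  nodes.foldl (fun d n => d.insert n n) PySem.Dict.empty

-- for weight, u, v in mst: uf.union(u, v)
def pvUnionLoop (fuel : Nat) (es : List (Int × Int × Int)) (p : PySem.Dict Int Int) :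
    PySem.Dict Int Int :=
  es.foldl (fun p e => (pvUnion fuel p e.2.1 e.2.2).1) p

-- clusters = defaultdict(list); for node in nodes: clusters[uf.find(node)].append(node)
def pvGroupA (fuel : Nat) (nodes : List Int) (p : PySem.Dict Int Int) :
    PySem.Dict Int (List Int) :=
  (nodes.foldl
    (fun (st : PySem.Dict Int Int × PySem.Dict Int (List Int)) z =>
      let fr := pvFind fuel st.1 z
      (fr.1, PySem.Dict.modify st.2 fr.2 [] (fun c => c ++ [z])))
    (p, PySem.Dict.empty)).2

-- sorted(clusters.values(), key=lambda c: (-len(c), sorted(c))); [sorted(c) for c in ...]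
-- (the identical last two lines of A and of B)
def pvSortClusters (cl : PySem.Dict Int (List Int)) : List (List Int) :=
  (PySem.List.sorted2 cl.values (fun c => -(c.length : Int))
      (fun c => PySem.List.sorted c (fun x => x) false) false).map
    (fun c => PySem.List.sorted c (fun x => x) false)

def get_clusters_from_mst (mst : List (Int × Int × Int)) (k : Int) (nodes : List Int) : List (List Int) :=
  pvSortClusters (pvGroupA (nodes.length + 1) nodes
    (pvUnionLoop (nodes.length + 1) (pvPops k mst) (pvInitUF nodes)))

-- ===== PORT B =====
-- del mst[max(len(mst) - (k - 1), 0):]  (keeps the prefix of that length)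
def pvDelSlice (mst : List (Int × Int × Int)) (k : Int) : List (Int × Int × Int) :=
  mst.take (max ((mst.length : Int) - (k - 1)) 0).toNat

-- for weight, u, v in mst: lu, lv = label[u], label[v]; if lu != lv: rewrite label lu -> lv
-- (label[u], label[v]: the key is present under Pre_, so getD's default is never read there)
def pvRelabel (es : List (Int × Int × Int)) (lab : PySem.Dict Int Int) : PySem.Dict Int Int :=
  es.foldl
    (fun lab e =>
      let lu := lab.getD e.2.1 0
      let lv := lab.getD e.2.2 0
      if lu ≠ lv then
        PySem.Dict.mk (lab.items.map (fun p => if p.2 = lu then (p.1, lv) else p))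
      else lab) lab

-- clusters = {}; for node in nodes: clusters.setdefault(label[node], []).append(node)
def pvGroupB (lab : PySem.Dict Int Int) (nodes : List Int) : PySem.Dict Int (List Int) :=
  nodes.foldl
    (fun cl z => PySem.Dict.modify cl (lab.getD z 0) [] (fun c => c ++ [z]))
    PySem.Dict.empty

def get_clusters_from_mst_alt (mst : List (Int × Int × Int)) (k : Int) (nodes : List Int) : List (List Int) :=
  pvSortClusters (pvGroupB
    (pvRelabel (pvDelSlice mst k) (nodes.foldl (fun d n => d.insert n n) PySem.Dict.empty))
    nodes)

-- ===== PRECONDITION & SPEC =====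
-- the edges remaining after the k-1 pops
def pvRemaining (mst : List (Int × Int × Int)) (k : Int) : List (Int × Int × Int) :=
  mst.take (mst.length - (k - 1).toNat)

-- A raises KeyError (in UnionFind.find) exactly when an endpoint of a remaining edge is not in
-- nodes; B raises the same KeyError there. Pre_ excludes exactly those inputs.
def Pre_get_clusters_from_mst (mst : List (Int × Int × Int)) (k : Int) (nodes : List Int) : Prop :=
  ∀ e ∈ pvRemaining mst k, e.2.1 ∈ nodes ∧ e.2.2 ∈ nodes
instance (mst : List (Int × Int × Int)) (k : Int) (nodes : List Int) : Decidable (Pre_get_clusters_from_mst mst k nodes) := by unfold Pre_get_clusters_from_mst; infer_instance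

def pvWitness_get_clusters_from_mst : (List (Int × Int × Int)) × Int × List Int :=
  ([(1, 0, 1), (2, 1, 2)], 2, [0, 1, 2])

def Spec_get_clusters_from_mst (mst : List (Int × Int × Int)) (k : Int) (nodes : List Int) (out : List (List Int)) : Prop := out = get_clusters_from_mst_alt mst k nodes
instance (mst : List (Int × Int × Int)) (k : Int) (nodes : List Int) (out : List (List Int)) : Decidable (Spec_get_clusters_from_mst mst k nodes out) := by unfold Spec_get_clusters_from_mst; infer_instance

-- ===== CLAIM (what is proved, stated in full; the proofs are below) =====
def Claim_equal_get_clusters_from_mst : Prop := ∀ (mst : List (Int × Int × Int)) (k : Int) (nodes : List Int), Dom_get_clusters_from_mst mst k nodes → Pre_get_clusters_from_mst mst k nodes → Spec_get_clusters_from_mst mst k nodes (get_clusters_from_mst mst k nodes)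

-- ===== LEMMAS AND PROOFS =====

-- ρ is an abstract root assignment for the parent forest p over the node list N; d witnesses
-- that proper parent edges strictly descend (hence that find terminates).
def pvInv (N : List Int) (p : PySem.Dict Int Int) (ρ : Int → Int) (d : Int → Nat) : Prop :=
  (∀ z : Int, (p.get? z).isSome ↔ z ∈ N)
  ∧ (∀ x v : Int, p.get? x = some v → v ∈ N ∧ ρ v = ρ x)
  ∧ (∀ x : Int, x ∈ N → ρ x ∈ N ∧ p.get? (ρ x) = some (ρ x))
  ∧ (∀ x : Int, p.get? x = some x → ρ x = x)
  ∧ (∀ x v : Int, p.get? x = some v → v ≠ x → d v < d x)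

-- one merge step on root assignments (the shared abstraction of union and of B's label rewrite)
def pvMerge (ρ : Int → Int) (u v : Int) : Int → Int := fun z => if ρ z = ρ u then ρ v else ρ z
theorem pvInv_compress (N : List Int) (p : PySem.Dict Int Int) (ρ : Int → Int) (d : Int → Nat)
    (x px ppx : Int) (hInv : pvInv N p ρ d)
    (hpx : p.get? x = some px) (hne : px ≠ x) (hppx : p.get? px = some ppx)
    (hxne : ppx ≠ x) (hd : d ppx < d x) :
    pvInv N (p.insert x ppx) ρ d := by
  obtain ⟨h1, h2, h3, h4, h5⟩ := hInv
  refine ⟨?_, ?_, ?_, ?_, ?_⟩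
  · intro z
    rw [PySem.Dict.get?_insert]
    split_ifs with hz
    · subst hz; simpa using (h1 z).mp (by simp [hpx])
    · exact h1 z
  · intro a v hv
    rw [PySem.Dict.get?_insert] at hv
    split_ifs at hv with ha
    · obtain rfl : ppx = v := Option.some.inj hv
      refine ⟨(h2 px ppx hppx).1, ?_⟩
      rw [ha, (h2 px ppx hppx).2, (h2 x px hpx).2]
    · exact h2 a v hv
  · intro a ha
    refine ⟨(h3 a ha).1, ?_⟩
    rw [PySem.Dict.get?_insert]
    split_ifs with hz
    · exfalso; have := (h3 a ha).2; rw [hz] at this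
      rw [hpx] at this; exact hne (by injection this)
    · exact (h3 a ha).2
  · intro a hv
    rw [PySem.Dict.get?_insert] at hv
    split_ifs at hv with ha
    · exact absurd ((Option.some.inj hv).trans ha) hxne
    · exact h4 a hv
  · intro a v hv hvne
    rw [PySem.Dict.get?_insert] at hv
    split_ifs at hv with ha
    · obtain rfl : ppx = v := Option.some.inj hv
      subst ha; exact hd
    · exact h5 a v hv hvne

theorem pvFind_spec (N : List Int) (ρ : Int → Int) (d : Int → Nat) :
    ∀ (fuel : Nat) (p : PySem.Dict Int Int) (x : Int) (seen : List Int),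
      pvInv N p ρ d → x ∈ N → seen.Nodup → (∀ s ∈ seen, s ∈ N) → (∀ s ∈ seen, d x < d s) →
      N.dedup.length + 1 ≤ fuel + seen.length →
      (pvFind fuel p x).2 = ρ x ∧ pvInv N (pvFind fuel p x).1 ρ d := by
  intro fuel
  induction fuel with
  | zero =>
    intro p x seen hInv hx hnd hsub hlt hle
    exfalso
    have : seen.length ≤ N.dedup.length := by
      refine (List.subperm_of_subset ?_ ?_).length_le
      · exact hnd
      · intro s hs; exact List.mem_dedup.mpr (hsub s hs)
    omega
  | succ fuel ih =>
    intro p x seen hInv hx hnd hsub hlt hle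
    obtain ⟨h1, h2, h3, h4, h5⟩ := hInv
    obtain ⟨px, hpx⟩ := Option.isSome_iff_exists.mp ((h1 x).mpr hx)
    by_cases hxx : px = x
    · subst hxx
      have : ρ px = px := h4 px hpx
      simp [pvFind, hpx, this]
      exact ⟨h1, h2, h3, h4, h5⟩
    · obtain ⟨ppx, hppx⟩ := Option.isSome_iff_exists.mp ((h1 px).mpr (h2 x px hpx).1)
      have hdpx : d px < d x := h5 x px hpx hxx
      have hppxx : ppx ≠ x := by
        intro h; subst h
        by_cases hpp : ppx = px
        · exact hxx hpp.symm
        · exact absurd (h5 px ppx hppx hpp) (by omega)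
      have hdppx : d ppx < d x := by
        by_cases hpp : ppx = px
        · subst hpp; exact hdpx
        · exact lt_trans (h5 px ppx hppx hpp) hdpx
      have hInv' : pvInv N (p.insert x ppx) ρ d :=
        pvInv_compress N p ρ d x px ppx ⟨h1, h2, h3, h4, h5⟩ hpx hxx hppx hppxx hdppx
      have hxseen : x ∉ seen := fun h => absurd (hlt x h) (by omega)
      have hres := ih (p.insert x ppx) ppx (x :: seen) hInv' (h2 px ppx hppx).1
        (List.nodup_cons.mpr ⟨hxseen, hnd⟩)
        (by intro s hs; rcases List.mem_cons.mp hs with h | h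
            · subst h; exact hx
            · exact hsub s h)
        (by intro s hs; rcases List.mem_cons.mp hs with h | h
            · subst h; exact hdppx
            · exact lt_trans hdppx (hlt s h))
        (by simp at hle ⊢; omega)
      have hρ : ρ ppx = ρ x := by rw [(h2 px ppx hppx).2, (h2 x px hpx).2]
      simp only [pvFind, hpx, hppx, if_neg hxx]
      exact ⟨by rw [hres.1, hρ], hres.2⟩

theorem pvInv_congr (N : List Int) (p : PySem.Dict Int Int) (ρ ρ' : Int → Int) (d : Int → Nat)
    (h : ∀ z, ρ z = ρ' z) (hInv : pvInv N p ρ d) : pvInv N p ρ' d := by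
  obtain ⟨h1, h2, h3, h4, h5⟩ := hInv
  refine ⟨h1, ?_, ?_, ?_, h5⟩
  · intro x v hv; exact ⟨(h2 x v hv).1, by rw [← h v, ← h x]; exact (h2 x v hv).2⟩
  · intro x hx; rw [← h x]; exact h3 x hx
  · intro x hv; rw [← h x]; exact h4 x hv

theorem pvFindRoot (N : List Int) (ρ : Int → Int) (d : Int → Nat)
    (p : PySem.Dict Int Int) (x : Int) (hInv : pvInv N p ρ d) (hx : x ∈ N) :
    (pvFind (N.length + 1) p x).2 = ρ x ∧ pvInv N (pvFind (N.length + 1) p x).1 ρ d := by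
  refine pvFind_spec N ρ d (N.length + 1) p x [] hInv hx (by simp) (by simp) (by simp) ?_
  have := N.dedup_sublist.length_le
  omega

theorem pvUnion_spec (N : List Int) (ρ : Int → Int) (d : Int → Nat)
    (p : PySem.Dict Int Int) (u v : Int)
    (hInv : pvInv N p ρ d) (hu : u ∈ N) (hv : v ∈ N) :
    ∃ d', pvInv N (pvUnion (N.length + 1) p u v).1 (pvMerge ρ u v) d' := by
  obtain ⟨hr1, hInv1⟩ := pvFindRoot N ρ d p u hInv hu
  obtain ⟨hr2, hInv2⟩ := pvFindRoot N ρ d _ v hInv1 hv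
  unfold pvUnion
  simp only [hr1, hr2]
  by_cases heq : ρ u = ρ v
  · refine ⟨d, ?_⟩
    simp only [if_pos heq]
    refine pvInv_congr N _ ρ _ d (fun z => ?_) hInv2
    unfold pvMerge
    split_ifs with h
    · rw [h, heq]
    · rfl
  · obtain ⟨g1, g2, g3, g4, g5⟩ := hInv2
    have hρu : ρ (ρ u) = ρ u := g4 (ρ u) (g3 u hu).2
    have hρv : ρ (ρ v) = ρ v := g4 (ρ v) (g3 v hv).2
    refine ⟨fun z => if ρ z = ρ u then d z + d (ρ v) + 1 else d z, ?_⟩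
    simp only [if_neg heq]
    refine ⟨?_, ?_, ?_, ?_, ?_⟩
    · intro z
      rw [PySem.Dict.get?_insert]
      split_ifs with hz
      · subst hz; simp [(g3 u hu).1]
      · exact g1 z
    · intro a w hw
      rw [PySem.Dict.get?_insert] at hw
      split_ifs at hw with ha
      · obtain rfl : ρ v = w := Option.some.inj hw
        refine ⟨(g3 v hv).1, ?_⟩
        unfold pvMerge
        rw [ha]
        simp [hρu, hρv]
      · refine ⟨(g2 a w hw).1, ?_⟩
        unfold pvMerge
        rw [(g2 a w hw).2]
    · intro a ha
      unfold pvMerge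
      split_ifs with hc
      · refine ⟨(g3 v hv).1, ?_⟩
        rw [PySem.Dict.get?_insert, if_neg (fun h => heq h.symm)]
        exact (g3 v hv).2
      · refine ⟨(g3 a ha).1, ?_⟩
        rw [PySem.Dict.get?_insert, if_neg hc]
        exact (g3 a ha).2
    · intro a ha
      rw [PySem.Dict.get?_insert] at ha
      split_ifs at ha with hax
      · exact absurd ((Option.some.inj ha).trans hax) (fun h => heq h.symm)
      · have := g4 a ha
        unfold pvMerge
        rw [this, if_neg hax]
    · intro a w hw hne
      rw [PySem.Dict.get?_insert] at hw
      split_ifs at hw with hax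
      · obtain rfl : ρ v = w := Option.some.inj hw
        subst hax
        have hnv : ¬ ρ (ρ v) = ρ u := by rw [hρv]; exact fun h => heq h.symm
        simp only [hnv, hρu, if_true, if_false]
        omega
      · have hcond : (ρ w = ρ u) = (ρ a = ρ u) := by rw [(g2 a w hw).2]
        have := g5 a w hw hne
        simp only []
        by_cases hc : ρ a = ρ u
        · rw [if_pos (hcond ▸ hc), if_pos hc]; omega
        · rw [if_neg (hcond ▸ hc), if_neg hc]; exact this

theorem pvEdges_spec (N : List Int) :
    ∀ (es : List (Int × Int × Int)) (p : PySem.Dict Int Int) (ρ : Int → Int) (d : Int → Nat),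
      (∀ e ∈ es, e.2.1 ∈ N ∧ e.2.2 ∈ N) → pvInv N p ρ d →
      ∃ d', pvInv N (es.foldl (fun p e => (pvUnion (N.length + 1) p e.2.1 e.2.2).1) p)
        (es.foldl (fun ρ e => pvMerge ρ e.2.1 e.2.2) ρ) d' := by
  intro es
  induction es with
  | nil => intro p ρ d _ hInv; exact ⟨d, hInv⟩
  | cons e t ih =>
    intro p ρ d hends hInv
    obtain ⟨d', hInv'⟩ := pvUnion_spec N ρ d p e.2.1 e.2.2 hInv
      (hends e (List.mem_cons_self)).1 (hends e (List.mem_cons_self)).2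
    exact ih _ _ d' (fun e' he' => hends e' (List.mem_cons_of_mem e he')) hInv'

theorem pvInit_get? :
    ∀ (l : List Int) (d : PySem.Dict Int Int) (z : Int),
      (l.foldl (fun d n => d.insert n n) d).get? z = if z ∈ l then some z else d.get? z := by
  intro l
  induction l with
  | nil => intro d z; simp
  | cons n t ih =>
    intro d z
    simp only [List.foldl_cons, ih, List.mem_cons]
    rw [PySem.Dict.get?_insert]
    by_cases hz : z ∈ t
    · simp [hz]
    · by_cases hn : z = n
      · simp [hn]
      · simp [hz, hn]

theorem pvInit_inv (N : List Int) :
    pvInv N (N.foldl (fun d n => d.insert n n) PySem.Dict.empty) id (fun _ => 0) := by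
  refine ⟨?_, ?_, ?_, ?_, ?_⟩ <;> intro x <;> rw [pvInit_get?] <;> try rw [pvInit_get?]
  · split_ifs with h <;> simp [h, PySem.Dict.get?_empty]
  · intro v hv
    split_ifs at hv with h
    · obtain rfl : x = v := Option.some.inj hv
      exact ⟨h, rfl⟩
    · simp [PySem.Dict.get?_empty] at hv
  · intro hx; simp only [id]; simp [hx]
  · intro hv; rfl
  · intro v hv hne
    split_ifs at hv with h
    · exact absurd (Option.some.inj hv).symm hne
    · simp [PySem.Dict.get?_empty] at hv

theorem pvGroup_spec (N : List Int) (ρ : Int → Int) (d : Int → Nat) :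
    ∀ (l : List Int) (p : PySem.Dict Int Int) (acc : PySem.Dict Int (List Int)),
      (∀ z ∈ l, z ∈ N) → pvInv N p ρ d →
      (l.foldl (fun (st : PySem.Dict Int Int × PySem.Dict Int (List Int)) z =>
          let fr := pvFind (N.length + 1) st.1 z
          (fr.1, PySem.Dict.modify st.2 fr.2 [] (fun c => c ++ [z]))) (p, acc)).2
        = l.foldl (fun acc z => PySem.Dict.modify acc (ρ z) [] (fun c => c ++ [z])) acc := by
  intro l
  induction l with
  | nil => intro p acc _ _; rfl
  | cons z t ih =>
    intro p acc hmem hInv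
    obtain ⟨hr, hInv'⟩ := pvFindRoot N ρ d p z hInv (hmem z List.mem_cons_self)
    simp only [List.foldl_cons, hr]
    exact ih _ _ (fun w hw => hmem w (List.mem_cons_of_mem z hw)) hInv'

-- value-only rewrite of a dict's items
theorem pvMapVal_get? (h : Int → Int) :
    ∀ (l : List (Int × Int)) (z : Int),
      (PySem.Dict.mk (l.map (fun p => (p.1, h p.2)))).get? z = ((PySem.Dict.mk l).get? z).map h := by
  intro l
  induction l with
  | nil => intro z; simp [PySem.Dict.get?]
  | cons a t ih =>
    intro z
    simp only [List.map_cons]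
    rw [PySem.Dict.get?_mk_cons, PySem.Dict.get?_mk_cons]
    split_ifs with hz
    · rfl
    · exact ih z

theorem pvLabel_spec (N : List Int) :
    ∀ (es : List (Int × Int × Int)) (lab : PySem.Dict Int Int) (σ : Int → Int),
      (∀ e ∈ es, e.2.1 ∈ N ∧ e.2.2 ∈ N) →
      (∀ z : Int, lab.get? z = if z ∈ N then some (σ z) else none) →
      ∀ z : Int,
        (es.foldl (fun lab e =>
            let lu := lab.getD e.2.1 0
            let lv := lab.getD e.2.2 0
            if lu ≠ lv then
              PySem.Dict.mk (lab.items.map (fun p => if p.2 = lu then (p.1, lv) else p))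
            else lab) lab).get? z
          = if z ∈ N then some ((es.foldl (fun σ e => pvMerge σ e.2.1 e.2.2) σ) z) else none := by
  intro es
  induction es with
  | nil => intro lab σ _ h z; exact h z
  | cons e t ih =>
    intro lab σ hends h z
    have hu : lab.getD e.2.1 0 = σ e.2.1 := by
      rw [PySem.Dict.getD_eq_get?_getD, h e.2.1, if_pos (hends e List.mem_cons_self).1]; rfl
    have hv : lab.getD e.2.2 0 = σ e.2.2 := by
      rw [PySem.Dict.getD_eq_get?_getD, h e.2.2, if_pos (hends e List.mem_cons_self).2]; rfl
    have hends' := fun e' he' => hends e' (List.mem_cons_of_mem e he')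
    simp only [List.foldl_cons, hu, hv]
    by_cases hne : σ e.2.1 = σ e.2.2
    · rw [if_neg (by simp [hne])]
      refine ih lab _ hends' (fun w => ?_) z
      rw [h w]
      unfold pvMerge
      split_ifs with hc <;> simp_all
    · rw [if_pos (by simp [hne])]
      refine ih _ _ hends' (fun w => ?_) z
      have : (fun p : Int × Int => if p.2 = σ e.2.1 then (p.1, σ e.2.2) else p)
           = (fun p : Int × Int => (p.1, if p.2 = σ e.2.1 then σ e.2.2 else p.2)) := by
        funext p; split_ifs <;> rfl
      rw [this]
      have hmk : lab = PySem.Dict.mk lab.items := rfl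
      rw [hmk, pvMapVal_get? (fun w => if w = σ e.2.1 then σ e.2.2 else w), ← hmk, h w]
      by_cases hw : w ∈ N
      · simp only [if_pos hw, Option.map_some]
        rfl
      · simp [hw]

theorem pvPop_fold :
    ∀ (L : List Int) (l : List (Int × Int × Int)),
      L.foldl (fun m _ => if m = [] then m else m.dropLast) l = l.take (l.length - L.length) := by
  intro L
  induction L with
  | nil => intro l; simp
  | cons a t ih =>
    intro l
    simp only [List.foldl_cons, ih]
    by_cases hl : l = []
    · simp [hl]
    · rw [if_neg hl, List.dropLast_eq_take, List.take_take]
      simp only [List.length_take, List.length_cons]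
      congr 1
      omega

theorem pvRange_len (m : Int) : (PySem.List.pyRange 0 m 1).length = m.toNat := by
  simp [PySem.List.pyRange]
  omega

theorem pvTake_eq (l : List (Int × Int × Int)) (k : Int) :
    l.take (max ((l.length : Int) - (k - 1)) 0).toNat = l.take (l.length - (k - 1).toNat) := by
  rcases le_total ((l.length : Int) - (k - 1)) 0 with h | h
  · rw [max_eq_right h, Int.toNat_zero]
    have h0 : l.length - (k - 1).toNat = 0 := by omega
    rw [h0]
  · rw [max_eq_left h]
    by_cases h2 : 0 ≤ k - 1
    · obtain ⟨m, hm⟩ := Int.eq_ofNat_of_zero_le h2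
      rw [hm, Int.toNat_sub, Int.toNat_natCast]
    · have h3 : (k - 1).toNat = 0 := Int.toNat_of_nonpos (by omega)
      rw [h3, Nat.sub_zero, List.take_length, List.take_of_length_le (by omega)]

-- ===== VERDICT (by name: the statement is the Claim_ definition above) =====
theorem get_clusters_from_mst_spec : Claim_equal_get_clusters_from_mst := by
  intro mst k nodes _ hpre
  unfold Spec_get_clusters_from_mst get_clusters_from_mst get_clusters_from_mst_alt
  have hremA : pvPops k mst = pvRemaining mst k := by
    unfold pvPops pvRemaining
    rw [pvPop_fold, pvRange_len]
  have hremB : pvDelSlice mst k = pvRemaining mst k := pvTake_eq mst k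
  rw [hremA, hremB]
  set R := pvRemaining mst k with hR
  set ρf : Int → Int := R.foldl (fun ρ e => pvMerge ρ e.2.1 e.2.2) id with hρf
  obtain ⟨d', hInvF⟩ :=
    pvEdges_spec nodes R (pvInitUF nodes) id (fun _ => 0) hpre (pvInit_inv nodes)
  have hA : pvGroupA (nodes.length + 1) nodes (pvUnionLoop (nodes.length + 1) R (pvInitUF nodes))
      = nodes.foldl (fun acc z => PySem.Dict.modify acc (ρf z) [] (fun c => c ++ [z]))
          PySem.Dict.empty := by
    unfold pvGroupA pvUnionLoop
    exact pvGroup_spec nodes ρf d' nodes _ _ (fun z h => h) hInvF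
  have hlab : ∀ z, (pvRelabel R (nodes.foldl (fun d n => d.insert n n) PySem.Dict.empty)).get? z
      = if z ∈ nodes then some (ρf z) else none := by
    unfold pvRelabel
    exact pvLabel_spec nodes R _ id hpre
      (fun z => by rw [pvInit_get?]; split_ifs <;> simp [PySem.Dict.get?_empty])
  have hB : pvGroupB (pvRelabel R (nodes.foldl (fun d n => d.insert n n) PySem.Dict.empty)) nodes
      = nodes.foldl (fun acc z => PySem.Dict.modify acc (ρf z) [] (fun c => c ++ [z]))
          PySem.Dict.empty := by
    unfold pvGroupB
    refine PySem.List.foldl_congr_mem nodes _ _ _ ?_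
    intro acc z hz
    rw [PySem.Dict.getD_eq_get?_getD, hlab z, if_pos hz]
    rfl
  rw [hA, hB]
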